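-- pv_equiv track=rewrite | github.com/sheilsplenbluli/csvwrangler | csvwrangler/join.py | join_rows
-- ===== SOURCE A (Python) =====
-- from typing import List, Dict, Optional
--
-- Row = Dict[str, str]
--
-- def _index_rows(rows: List[Row], key: str) -> Dict[str, List[Row]]:
--     index: Dict[str, List[Row]] = {}
--     for row in rows:
--         val = row.get(key, "")
--         index.setdefault(val, []).append(row)
--     return index
--
-- def _merge(left: Row, right: Optional[Row], right_cols: List[str]) -> Row:
--     merged = dict(left)
--     for col in right_cols:
--         merged[col] = right[col] if right else ""
--     return merged
--
-- def join_rows(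
--     left: List[Row],
--     right: List[Row],
--     on: str,
--     how: str = "inner",
--     suffixes: tuple = ("_x", "_y"),
-- ) -> List[Row]:
--     if not left or not right:
--         return []
--
--     left_cols = list(left[0].keys())
--     right_cols = [c for c in right[0].keys() if c != on]
--
--     # handle column name collisions
--     renamed_right: List[Row] = []
--     col_map: Dict[str, str] = {}
--     for col in right_cols:
--         new_name = col + suffixes[1] if col in left_cols else col
--         col_map[col] = new_name
--     for row in right:
--         renamed_right.append({col_map.get(k, k): v for k, v in row.items() if k != on} | {on: row[on]})
--
--     final_right_cols = [col_map[c] for c in right_cols]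
--     right_index = _index_rows(renamed_right, on)
--     left_index = _index_rows(left, on)
--
--     result: List[Row] = []
--
--     if how in ("inner", "left"):
--         for row in left:
--             key_val = row[on]
--             matches = right_index.get(key_val)
--             if matches:
--                 for r in matches:
--                     result.append(_merge(row, r, final_right_cols))
--             elif how == "left":
--                 result.append(_merge(row, None, final_right_cols))
--
--     elif how == "right":
--         for row in renamed_right:
--             key_val = row[on]
--             matches = left_index.get(key_val)
--             if matches:
--                 for l in matches:
--                     result.append(_merge(l, row, final_right_cols))
--             else:
--                 empty_left = {c: "" for c in left_cols}
--                 empty_left[on] = key_val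
--                 result.append(_merge(empty_left, row, final_right_cols))
--     else:
--         raise ValueError(f"Unknown join type: {how!r}. Use 'inner', 'left', or 'right'.")
--
--     return result
-- ===== SOURCE B (Python) =====
-- from typing import List, Dict
--
-- Row = Dict[str, str]
--
-- def join_rows(
--     left: List[Row],
--     right: List[Row],
--     on: str,
--     how: str = "inner",
--     suffixes: tuple = ("_x", "_y"),
-- ) -> List[Row]:
--     if not left or not right:
--         return []
--     if how not in ("inner", "left", "right"):
--         raise ValueError(f"Unknown join type: {how!r}. Use 'inner', 'left', or 'right'.")
--
--     left_cols = list(left[0].keys())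
--     right_cols = [c for c in right[0].keys() if c != on]
--
--     def ren(c: str) -> str:
--         return c + suffixes[1] if c in right_cols and c in left_cols else c
--
--     def rename(row: Row) -> Row:
--         return dict([(ren(k), v) for k, v in row.items() if k != on] + [(on, row[on])])
--
--     def merge(base: Row, r) -> Row:
--         return dict(list(base.items()) + [(ren(c), r[ren(c)] if r else "") for c in right_cols])
--
--     renamed_right = [rename(row) for row in right]
--
--     if how == "right":
--         def expand(row: Row) -> List[Row]:
--             ms = [l for l in left if l.get(on, "") == row[on]]
--             if ms:
--                 return [merge(l, row) for l in ms]
--             return [merge(dict.fromkeys(left_cols, "") | {on: row[on]}, row)]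
--         return [out for row in renamed_right for out in expand(row)]
--
--     def expand(row: Row) -> List[Row]:
--         ms = [r for r in renamed_right if r.get(on, "") == row[on]]
--         if ms:
--             return [merge(row, r) for r in ms]
--         return [merge(row, None)] if how == "left" else []
--     return [out for row in left for out in expand(row)]
-- ===== Notes on version B (the rewrite author's own statement) =====
-- stated objective: alternative
-- what changed: Replaced A's staged hash-index build (_index_rows twice) plus append loops and its col_map dict with a comprehension-style join: a renaming function instead of the col_map dict, dict-of-pair-list construction for rename/merge, and per-row flat list comprehensions over in-order filters of the other side instead of index lookups.
import Mathlib
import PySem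

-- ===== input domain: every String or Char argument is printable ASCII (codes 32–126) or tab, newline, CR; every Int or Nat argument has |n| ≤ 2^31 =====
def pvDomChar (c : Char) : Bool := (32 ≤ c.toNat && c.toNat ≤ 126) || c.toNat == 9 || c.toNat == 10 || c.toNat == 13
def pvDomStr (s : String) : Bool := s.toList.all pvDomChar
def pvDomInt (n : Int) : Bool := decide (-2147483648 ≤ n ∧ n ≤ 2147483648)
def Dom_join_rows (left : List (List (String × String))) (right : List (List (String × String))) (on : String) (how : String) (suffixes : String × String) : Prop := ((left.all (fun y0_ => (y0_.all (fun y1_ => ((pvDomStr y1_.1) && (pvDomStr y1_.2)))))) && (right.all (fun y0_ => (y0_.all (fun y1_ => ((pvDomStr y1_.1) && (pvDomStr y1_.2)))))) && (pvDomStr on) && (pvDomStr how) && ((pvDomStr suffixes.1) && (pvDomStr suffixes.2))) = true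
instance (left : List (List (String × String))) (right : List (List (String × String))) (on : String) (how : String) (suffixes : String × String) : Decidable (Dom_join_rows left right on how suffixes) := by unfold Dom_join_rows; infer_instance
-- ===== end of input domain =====

-- B replaces A's two hash indexes and col_map dict with comprehension-style flatMap/filter scans, a renaming
-- FUNCTION, and dict-of-pair-list construction; equal return value on Pre_.
-- Rows (Python dicts) enter as association lists and are decoded with PySem.Dict.ofList (= dict(pairs)) in both ports.

-- ===== PORT A =====
-- _merge(left, right, right_cols) of A's module
def pvMerge (l : PySem.Dict String String) (r : Option (PySem.Dict String String)) (cols : List String) : PySem.Dict String String :=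
  cols.foldl (fun m col => m.insert col (match r with | some rr => rr.getD col "" | none => "")) l

-- A's renaming comprehension {col_map.get(k, k): v for k, v in row.items() if k != on} | {on: row[on]}
-- (row[on] → getD on ""; KeyError excluded by Pre_)
def pvRenameRow (col_map : PySem.Dict String String) (on : String) (row : PySem.Dict String String) : PySem.Dict String String :=
  (row.items.foldl (fun d kv => if kv.1 == on then d else d.insert (col_map.getD kv.1 kv.1) kv.2)
    PySem.Dict.empty).insert on (row.getD on "")

-- _index_rows: index.setdefault(val, []).append(row)  =  modify val [] (· ++ [row])
def pvIndexRows (rows : List (PySem.Dict String String)) (key : String) : PySem.Dict String (List (PySem.Dict String String)) :=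
  rows.foldl (fun d row => d.modify (row.getD key "") [] (· ++ [row])) PySem.Dict.empty

-- `matches = idx.get(v); if matches:` is ported as `ms = idx.getD v []; if ¬ms.isEmpty` — same truthiness (None and [] are falsy);
-- the unknown-`how` branch raises ValueError in Python (excluded by Pre_); the port returns [].
def join_rows (left : List (List (String × String))) (right : List (List (String × String))) (on : String) (how : String) (suffixes : String × String) : List (List (String × String)) :=
  if left.isEmpty || right.isEmpty then [] else
  let leftD := left.map PySem.Dict.ofList
  let rightD := right.map PySem.Dict.ofList
  let left_cols := (leftD.headD PySem.Dict.empty).keys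
  let right_cols := ((rightD.headD PySem.Dict.empty).keys).filter (fun c => c != on)
  let col_map := right_cols.foldl
    (fun m col => m.insert col (if left_cols.contains col then col ++ suffixes.2 else col)) PySem.Dict.empty
  let renamed_right := rightD.map (pvRenameRow col_map on)
  let final_right_cols := right_cols.map (fun c => col_map.getD c c)
  let right_index := pvIndexRows renamed_right on
  let left_index := pvIndexRows leftD on
  if how == "inner" || how == "left" then
    leftD.foldl (fun res row =>
      let ms := right_index.getD (row.getD on "") []
      if !ms.isEmpty then res ++ ms.map (fun r => (pvMerge row (some r) final_right_cols).items)
      else if how == "left" then res ++ [(pvMerge row none final_right_cols).items]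
      else res) []
  else if how == "right" then
    renamed_right.foldl (fun res row =>
      let ms := left_index.getD (row.getD on "") []
      if !ms.isEmpty then res ++ ms.map (fun l => (pvMerge l (some row) final_right_cols).items)
      else
        let empty_left := (left_cols.foldl (fun d c => d.insert c "") PySem.Dict.empty).insert on (row.getD on "")
        res ++ [(pvMerge empty_left (some row) final_right_cols).items]) []
  else []

-- ===== PORT B =====
-- B's renaming function ren(c) = c + suffixes[1] if c in right_cols and c in left_cols else c
def pvRen (right_cols left_cols : List String) (suf : String) (c : String) : String :=
  if right_cols.contains c && left_cols.contains c then c ++ suf else c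

-- B's rename(row) = dict([(ren(k), v) for k, v in row.items() if k != on] + [(on, row[on])])
def pvRenameB (ren : String → String) (on : String) (row : PySem.Dict String String) : PySem.Dict String String :=
  PySem.Dict.ofList (((row.items.filter (fun kv => kv.1 != on)).map (fun kv => (ren kv.1, kv.2))) ++ [(on, row.getD on "")])

-- B's merge(base, r) = dict(list(base.items()) + [(ren(c), r[ren(c)] if r else "") for c in right_cols])
def pvMergeB (ren : String → String) (right_cols : List String) (base : PySem.Dict String String) (r : Option (PySem.Dict String String)) : PySem.Dict String String :=
  PySem.Dict.ofList (base.items ++ right_cols.map (fun c => (ren c, match r with | some rr => rr.getD (ren c) "" | none => "")))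

-- row[on] → getD on "" and the ValueError branch → [] exactly as in port A (same exclusions via Pre_)
def join_rows_alt (left : List (List (String × String))) (right : List (List (String × String))) (on : String) (how : String) (suffixes : String × String) : List (List (String × String)) :=
  if left.isEmpty || right.isEmpty then [] else
  if !(how == "inner" || how == "left" || how == "right") then [] else
  let leftD := left.map PySem.Dict.ofList
  let rightD := right.map PySem.Dict.ofList
  let left_cols := (leftD.headD PySem.Dict.empty).keys
  let right_cols := ((rightD.headD PySem.Dict.empty).keys).filter (fun c => c != on)
  let ren := pvRen right_cols left_cols suffixes.2
  let renamed_right := rightD.map (pvRenameB ren on)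
  if how == "right" then
    renamed_right.flatMap (fun row =>
      let ms := leftD.filter (fun l => l.getD on "" == row.getD on "")
      if !ms.isEmpty then ms.map (fun l => (pvMergeB ren right_cols l (some row)).items)
      else [(pvMergeB ren right_cols
              ((PySem.Dict.ofList (left_cols.map (fun c => (c, "")))).insert on (row.getD on ""))
              (some row)).items])
  else
    leftD.flatMap (fun row =>
      let ms := renamed_right.filter (fun r => r.getD on "" == row.getD on "")
      if !ms.isEmpty then ms.map (fun r => (pvMergeB ren right_cols row (some r)).items)
      else if how == "left" then [(pvMergeB ren right_cols row none).items] else [])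

-- ===== PRECONDITION & SPEC =====
-- Pre_ = exactly where the Python A returns, except that it requires EVERY right row to carry all of right[0]'s
-- non-key columns, while A only dereferences them on rows that reach _merge (an unmatched ragged right row in an
-- inner/left join slips through A) — see the cite in the claim.
def Pre_join_rows (left : List (List (String × String))) (right : List (List (String × String))) (on : String) (how : String) (suffixes : String × String) : Prop :=
  left = [] ∨ right = [] ∨
  ((how = "inner" ∨ how = "left" ∨ how = "right") ∧
   (∀ r ∈ right, on ∈ r.map Prod.fst) ∧
   (how = "right" ∨ ∀ l ∈ left, on ∈ l.map Prod.fst) ∧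
   (∀ r ∈ right, ∀ c ∈ (right.headD []).map Prod.fst, c = on ∨ c ∈ r.map Prod.fst))
instance (left : List (List (String × String))) (right : List (List (String × String))) (on : String) (how : String) (suffixes : String × String) : Decidable (Pre_join_rows left right on how suffixes) := by unfold Pre_join_rows; infer_instance

def pvWitness_join_rows : (List (List (String × String))) × (List (List (String × String))) × String × String × (String × String) :=
  ([[("id", "1"), ("a", "x")]], [[("id", "1"), ("b", "y")]], "id", "inner", ("_x", "_y"))

def Spec_join_rows (left : List (List (String × String))) (right : List (List (String × String))) (on : String) (how : String) (suffixes : String × String) (out : List (List (String × String))) : Prop := out = join_rows_alt left right on how suffixes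
instance (left : List (List (String × String))) (right : List (List (String × String))) (on : String) (how : String) (suffixes : String × String) (out : List (List (String × String))) : Decidable (Spec_join_rows left right on how suffixes out) := by unfold Spec_join_rows; infer_instance

-- ===== CLAIM =====
def Claim_equal_join_rows : Prop := ∀ (left : List (List (String × String))) (right : List (List (String × String))) (on : String) (how : String) (suffixes : String × String), Dom_join_rows left right on how suffixes → Pre_join_rows left right on how suffixes → Spec_join_rows left right on how suffixes (join_rows left right on how suffixes)

-- ===== LEMMAS AND PROOFS =====

-- dict(pairs) unfolded to its insert fold
theorem pv_ofList_def {v : Type} (l : List (String × v)) :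
    (PySem.Dict.ofList l : PySem.Dict String v)
      = l.foldl (fun acc p => acc.insert p.1 p.2) PySem.Dict.empty := rfl

-- dict(d.items()) = d, for any dict with unique keys
theorem pv_ofList_items (d : PySem.Dict String String) (hd : d.keys.Nodup) :
    PySem.Dict.ofList d.items = d := by
  apply PySem.Dict.ext
  have h := PySem.Dict.items_foldl_insert_fresh (l := d.items) (k := Prod.fst) (v := Prod.snd)
    (d := (PySem.Dict.empty : PySem.Dict String String))
    (by intro a _; exact PySem.Dict.contains_empty _) (by simpa [PySem.Dict.keys] using hd)
  simpa [PySem.Dict.ofList, PySem.Dict.update, PySem.Dict.items, PySem.Dict.empty] using h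

-- lookup-with-self-default into an insert loop
theorem pv_foldl_insert_getD (g : String → String) (l : List String) (d : PySem.Dict String String) (k : String) :
    (l.foldl (fun m c => m.insert c (g c)) d).getD k k
      = if l.contains k then g k else d.getD k k := by
  induction l generalizing d with
  | nil => simp
  | cons c cs ih =>
    simp only [List.foldl_cons, ih, List.contains_cons, PySem.Dict.getD_insert]
    by_cases hk : k = c
    · subst hk; simp
    · simp [hk]

-- A's col_map.get(k, k) is B's ren(k)
theorem pv_colmap_eq_ren (right_cols left_cols : List String) (suf : String) (k : String) :
    (right_cols.foldl (fun m col => m.insert col (if left_cols.contains col then col ++ suf else col))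
        PySem.Dict.empty).getD k k = pvRen right_cols left_cols suf k := by
  rw [pv_foldl_insert_getD]
  unfold pvRen
  by_cases h1 : k ∈ right_cols <;> by_cases h2 : k ∈ left_cols <;>
    simp [h1, h2, PySem.Dict.getD_empty]

-- A's renaming loop is B's dict-of-pairs rename
theorem pv_rename_eq (right_cols left_cols : List String) (suf on : String) (row : PySem.Dict String String) :
    pvRenameRow (right_cols.foldl (fun m col => m.insert col (if left_cols.contains col then col ++ suf else col))
        PySem.Dict.empty) on row = pvRenameB (pvRen right_cols left_cols suf) on row := by
  unfold pvRenameRow pvRenameB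
  rw [pv_ofList_def, List.foldl_append]
  simp only [List.foldl_cons, List.foldl_nil]
  congr 1
  rw [List.foldl_map, ← PySem.List.foldl_if_eq_foldl_filter]
  have hstep : (fun (d : PySem.Dict String String) (kv : String × String) =>
      if kv.1 == on then d
      else d.insert ((right_cols.foldl (fun m col => m.insert col
        (if left_cols.contains col then col ++ suf else col)) PySem.Dict.empty).getD kv.1 kv.1) kv.2)
    = (fun d kv => if kv.1 != on then d.insert (pvRen right_cols left_cols suf kv.1) kv.2 else d) := by
    funext d kv
    rw [pv_colmap_eq_ren]
    by_cases h : kv.1 = on <;> simp [h, bne]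
  rw [hstep]

-- B's dict(base.items() + pairs) merge is A's insert-loop _merge
theorem pv_merge_eq (ren : String → String) (right_cols : List String)
    (base : PySem.Dict String String) (hb : base.keys.Nodup)
    (r : Option (PySem.Dict String String)) :
    pvMergeB ren right_cols base r = pvMerge base r (right_cols.map ren) := by
  unfold pvMergeB pvMerge
  rw [pv_ofList_def, List.foldl_append, List.foldl_map, List.foldl_map, ← pv_ofList_def,
    pv_ofList_items base hb]

-- every dict decoded from an input association list has unique keys
theorem pv_nodup_ofList (l : List (String × String)) : (PySem.Dict.ofList l : PySem.Dict String String).keys.Nodup :=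
  PySem.Dict.nodup_keys_update (d := (PySem.Dict.empty : PySem.Dict String String)) (ps := l)
    PySem.Dict.nodup_keys_empty

-- A's grouping index looked up with default [] is the in-order filter B scans for
theorem pvIndexRows_getD (rows : List (PySem.Dict String String)) (key v : String) :
    (pvIndexRows rows key).getD v [] = rows.filter (fun r => r.getD key "" == v) := by
  have h := PySem.Dict.getD_foldl_modify_append (l := rows.map (fun r => (r.getD key "", r)))
    (d := (PySem.Dict.empty : PySem.Dict String (List (PySem.Dict String String)))) (c := v)
  rw [List.foldl_map] at h
  simpa [List.filter_map, Function.comp_def] using h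

-- pointwise-equal bodies give equal flatMaps
theorem pv_flatMap_congr {α β : Type} (l : List α) (f g : α → List β) (h : ∀ a ∈ l, f a = g a) :
    l.flatMap f = l.flatMap g := by
  induction l with
  | nil => rfl
  | cons a as ih =>
    simp only [List.flatMap_cons, h a List.mem_cons_self,
      ih (fun b hb => h b (List.mem_cons_of_mem a hb))]

-- A's append-accumulating match loop (inner/left shape) is a flatMap
theorem pv_loop_flatMap {α γ β : Type} (l : List α) (ms : α → List γ) (f : α → γ → β)
    (cond : Bool) (fb : α → β) :
    l.foldl (fun res row => if !(ms row).isEmpty then res ++ (ms row).map (f row)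
                            else if cond then res ++ [fb row] else res) []
      = l.flatMap (fun row => if !(ms row).isEmpty then (ms row).map (f row)
                              else if cond then [fb row] else []) := by
  have hb : (fun (res : List β) row => if !(ms row).isEmpty then res ++ (ms row).map (f row)
      else if cond then res ++ [fb row] else res)
    = (fun res row => res ++ (if !(ms row).isEmpty then (ms row).map (f row)
      else if cond then [fb row] else [])) := by
    funext res row
    by_cases h : (ms row).isEmpty <;> by_cases hc : cond <;> simp [h, hc]
  rw [hb, PySem.List.foldl_append_eq_flatMap, List.nil_append]

-- A's append-accumulating match loop (right shape, unconditional fallback) is a flatMap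
theorem pv_loop_flatMapR {α γ β : Type} (l : List α) (ms : α → List γ) (f : α → γ → β)
    (fb : α → β) :
    l.foldl (fun res row => if !(ms row).isEmpty then res ++ (ms row).map (f row)
                            else res ++ [fb row]) []
      = l.flatMap (fun row => if !(ms row).isEmpty then (ms row).map (f row) else [fb row]) := by
  have hb : (fun (res : List β) row => if !(ms row).isEmpty then res ++ (ms row).map (f row)
      else res ++ [fb row])
    = (fun res row => res ++ (if !(ms row).isEmpty then (ms row).map (f row) else [fb row])) := by
    funext res row
    by_cases h : (ms row).isEmpty <;> simp [h]
  rw [hb, PySem.List.foldl_append_eq_flatMap, List.nil_append]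

theorem join_rows_eq_alt (left : List (List (String × String))) (right : List (List (String × String))) (on : String) (how : String) (suffixes : String × String)
    (hok : how = "inner" ∨ how = "left" ∨ how = "right") :
    join_rows left right on how suffixes = join_rows_alt left right on how suffixes := by
  unfold join_rows join_rows_alt
  split
  · rfl
  · simp only []
    have hnodupL : ∀ row ∈ left.map PySem.Dict.ofList, PySem.Dict.keys row |>.Nodup := by
      intro row hrow
      obtain ⟨l0, _, rfl⟩ := List.mem_map.1 hrow
      exact pv_nodup_ofList l0
    have hrename : ∀ rc lc : List String,
        pvRenameRow (rc.foldl (fun m col => m.insert col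
          (if lc.contains col then col ++ suffixes.2 else col)) PySem.Dict.empty) on
        = pvRenameB (pvRen rc lc suffixes.2) on := by
      intro rc lc; funext row; exact pv_rename_eq rc lc suffixes.2 on row
    have hfcols : ∀ rc lc : List String,
        rc.map (fun c => (rc.foldl (fun m col => m.insert col
          (if lc.contains col then col ++ suffixes.2 else col)) PySem.Dict.empty).getD c c)
        = rc.map (pvRen rc lc suffixes.2) := by
      intro rc lc
      exact List.map_congr_left (fun c _ => pv_colmap_eq_ren rc lc suffixes.2 c)
    rcases hok with hh | hh | hh
    -- inner / left
    · have h1 : (how == "inner" || how == "left") = true := by simp [hh]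
      have hg : (!(how == "inner" || how == "left" || how == "right")) = false := by simp [hh]
      have h2 : (how == "right") = false := by subst hh; decide
      rw [if_pos h1, hg]
      simp only [Bool.false_eq_true, if_false, h2]
      rw [pv_loop_flatMap]
      apply pv_flatMap_congr
      intro row hrow
      simp only [pvIndexRows_getD, hrename, hfcols,
        pv_merge_eq _ _ row (hnodupL row hrow)]
    · have h1 : (how == "inner" || how == "left") = true := by simp [hh]
      have hg : (!(how == "inner" || how == "left" || how == "right")) = false := by simp [hh]
      have h2 : (how == "right") = false := by subst hh; decide
      rw [if_pos h1, hg]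
      simp only [Bool.false_eq_true, if_false, h2]
      rw [pv_loop_flatMap]
      apply pv_flatMap_congr
      intro row hrow
      simp only [pvIndexRows_getD, hrename, hfcols,
        pv_merge_eq _ _ row (hnodupL row hrow)]
    -- right
    · have h1 : (how == "inner" || how == "left") = false := by subst hh; decide
      have hg : (!(how == "inner" || how == "left" || how == "right")) = false := by simp [hh]
      have h2 : (how == "right") = true := by simp [hh]
      rw [if_neg (by simp [h1]), if_pos h2, hg]
      simp only [Bool.false_eq_true, if_false, h2, if_true]
      rw [pv_loop_flatMapR, hrename]
      apply pv_flatMap_congr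
      intro row _
      simp only [pvIndexRows_getD, hfcols]
      by_cases hms : ((left.map PySem.Dict.ofList).filter
          (fun l => l.getD on "" == row.getD on "")).isEmpty
      · simp only [hms, Bool.not_true, Bool.false_eq_true, if_false]
        rw [pv_merge_eq _ _ _ (PySem.Dict.nodup_keys_insert _ _ _ (pv_nodup_ofList _)),
          pv_ofList_def, List.foldl_map]
      · simp only [hms, Bool.not_false, if_true]
        apply List.map_congr_left
        intro l hl
        rw [pv_merge_eq _ _ l (hnodupL l (List.mem_of_mem_filter hl))]

-- ===== VERDICT =====
theorem join_rows_spec : Claim_equal_join_rows := by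
  intro left right on how suffixes _ hpre
  unfold Spec_join_rows
  rcases hpre with h | h | h
  · subst h; rfl
  · subst h; unfold join_rows join_rows_alt; simp
  · exact join_rows_eq_alt left right on how suffixes h.1
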